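-- pv_equiv track=rewrite | github.com/TheTacBanana/AdventOfCode2021 | day5.py | CalcDiagonalPoint
-- ===== SOURCE A (Python) =====
-- def CalcDiagonalPoint(p1, p2):
--     dif1 = p2[0] - p1[0]
--     dif2 = p2[1] - p1[1]
--     if dif1 == dif2:
--         if p2[1] - p1[1] < 0: return [[p1[0] + i, p1[1] + i] for i in range(0, p2[1] - p1[1] - 1, -1)]
--         else: return [[p1[0] + i, p1[1] + i] for i in range(0, p2[1] - p1[1] + 1)]
--
--     elif dif1 == -dif2:
--         if p2[1] - p1[1] < 0: return [[p1[0] - i, p1[1] + i] for i in range(0, p2[1] - p1[1] - 1, -1)]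
--         else: return [[p1[0] - i, p1[1] + i] for i in range(0, p2[1] - p1[1] + 1)]
--
--     return None
-- ===== SOURCE B (Python) =====
-- def CalcDiagonalPoint(p1, p2):
--     a, b = p1[0], p1[1]
--     c, d = p2[0], p2[1]
--     if abs(c - a) != abs(d - b):
--         return None
--
--     def seg(x1, y1, x2, y2):
--         # points of the unit-slope diagonal from (x1,y1) to (x2,y2), by
--         # splitting the segment at its midpoint (divide and conquer)
--         if x1 == x2 and y1 == y2:
--             return [[x1, y1]]
--         n = abs(x2 - x1)
--         k = n // 2
--         sx = (x2 - x1) // n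
--         sy = (y2 - y1) // n
--         left = seg(x1, y1, x1 + sx * k, y1 + sy * k)
--         right = seg(x1 + sx * (k + 1), y1 + sy * (k + 1), x2, y2)
--         return left + right
--
--     return seg(a, b, c, d)
-- ===== Notes on version B (the rewrite author's own statement) =====
-- stated objective: alternative
-- what changed: Replaces A's single linear pass (four slope/direction-specific range comprehensions) by a divide-and-conquer: recursively split the segment at its midpoint and concatenate the two halves.
import Mathlib
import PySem

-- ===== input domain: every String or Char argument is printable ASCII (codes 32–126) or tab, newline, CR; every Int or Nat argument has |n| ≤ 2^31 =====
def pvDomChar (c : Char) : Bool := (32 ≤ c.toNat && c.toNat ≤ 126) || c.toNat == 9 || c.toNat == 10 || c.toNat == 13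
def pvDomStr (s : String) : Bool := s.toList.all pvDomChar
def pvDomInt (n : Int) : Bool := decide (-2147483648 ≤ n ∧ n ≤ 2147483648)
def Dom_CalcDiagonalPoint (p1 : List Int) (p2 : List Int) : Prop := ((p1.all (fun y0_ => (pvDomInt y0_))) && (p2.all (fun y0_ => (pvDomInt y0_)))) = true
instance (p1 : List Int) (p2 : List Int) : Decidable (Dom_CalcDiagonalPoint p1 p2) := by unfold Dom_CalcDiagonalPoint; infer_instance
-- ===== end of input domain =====

-- B replaces A's single linear pass (four range-comprehension branches) by a
-- divide-and-conquer that splits the segment at its midpoint and concatenates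
-- the two halves (objective: alternative); equal whenever both points have ≥ 2 coordinates.

-- ===== PORT A =====
def CalcDiagonalPoint (p1 : List Int) (p2 : List Int) : Option (List (List Int)) :=
  match PySem.List.pyGet? p1 0, PySem.List.pyGet? p1 1,
        PySem.List.pyGet? p2 0, PySem.List.pyGet? p2 1 with
  | some a, some b, some c, some d =>
    let dif1 := c - a
    let dif2 := d - b
    if dif1 = dif2 then
      if d - b < 0 then
        some ((PySem.List.pyRange 0 (d - b - 1) (-1)).map (fun i => [a + i, b + i]))
      else
        some ((PySem.List.pyRange 0 (d - b + 1) 1).map (fun i => [a + i, b + i]))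
    else if dif1 = -dif2 then
      if d - b < 0 then
        some ((PySem.List.pyRange 0 (d - b - 1) (-1)).map (fun i => [a - i, b + i]))
      else
        some ((PySem.List.pyRange 0 (d - b + 1) 1).map (fun i => [a - i, b + i]))
    else none
  | _, _, _, _ => none  -- IndexError in Python; excluded by Pre_

-- ===== PORT B =====
-- transliteration of Source B's recursive `seg`; the fuel argument only makes the
-- recursion total in Lean (the top call passes enough fuel for every admitted input)
def pvSeg : Nat → Int → Int → Int → Int → List (List Int)
  | 0, _, _, _, _ => []
  | fuel+1, x1, y1, x2, y2 =>
    if x1 = x2 ∧ y1 = y2 then [[x1, y1]]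
    else
      let n : Int := ((x2 - x1).natAbs : Int)
      let k := PySem.Int.floordiv n 2
      let sx := PySem.Int.floordiv (x2 - x1) n
      let sy := PySem.Int.floordiv (y2 - y1) n
      pvSeg fuel x1 y1 (x1 + sx * k) (y1 + sy * k) ++
      pvSeg fuel (x1 + sx * (k + 1)) (y1 + sy * (k + 1)) x2 y2

def CalcDiagonalPoint_alt (p1 : List Int) (p2 : List Int) : Option (List (List Int)) :=
  match p1, p2 with
  | a :: b :: _, c :: d :: _ =>
    if (c - a).natAbs ≠ (d - b).natAbs then none
    else some (pvSeg ((c - a).natAbs + 1) a b c d)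
  | _, _ => none  -- IndexError in Python; excluded by Pre_

-- ===== PRECONDITION & SPEC =====
-- Pre_ excludes exactly the inputs where Python A raises IndexError (a point with fewer than 2 coordinates).
def Pre_CalcDiagonalPoint (p1 : List Int) (p2 : List Int) : Prop := 2 ≤ p1.length ∧ 2 ≤ p2.length
instance (p1 : List Int) (p2 : List Int) : Decidable (Pre_CalcDiagonalPoint p1 p2) := by unfold Pre_CalcDiagonalPoint; infer_instance
def pvWitness_CalcDiagonalPoint : List Int × List Int := ([1, 2], [4, -1])
def Spec_CalcDiagonalPoint (p1 : List Int) (p2 : List Int) (out : Option (List (List Int))) : Prop := out = CalcDiagonalPoint_alt p1 p2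
instance (p1 : List Int) (p2 : List Int) (out : Option (List (List Int))) : Decidable (Spec_CalcDiagonalPoint p1 p2 out) := by unfold Spec_CalcDiagonalPoint; infer_instance

-- ===== CLAIM (what is proved, stated in full; the proofs are below) =====
def Claim_equal_CalcDiagonalPoint : Prop := ∀ (p1 : List Int) (p2 : List Int), Dom_CalcDiagonalPoint p1 p2 → Pre_CalcDiagonalPoint p1 p2 → Spec_CalcDiagonalPoint p1 p2 (CalcDiagonalPoint p1 p2)

-- ===== LEMMAS AND PROOFS =====

-- closed form of the divide-and-conquer `pvSeg` on a unit-slope segment with enough fuel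
lemma pvSeg_eq : ∀ (fuel : ℕ) (n : ℕ) (x y sx sy : Int),
    n < fuel → (sx = 1 ∨ sx = -1) → (sy = 1 ∨ sy = -1) →
    pvSeg fuel x y (x + n * sx) (y + n * sy)
      = (List.range (n + 1)).map (fun k : ℕ => [x + (k:Int) * sx, y + (k:Int) * sy]) := by
  intro fuel
  induction fuel with
  | zero => intro n x y sx sy h; exact absurd h (Nat.not_lt_zero n)
  | succ fuel ih =>
    intro n x y sx sy hn hsx hsy
    rcases Nat.eq_zero_or_pos n with h0 | hpos
    · subst h0
      simp [pvSeg]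
    · have hn0 : ((n:Int)) ≠ 0 := by omega
      have hxne : ¬ (x = x + (n:Int) * sx ∧ y = y + (n:Int) * sy) := by
        rcases hsx with h | h <;> rcases hsy with h' | h' <;> subst h <;> subst h' <;>
          intro hc <;> omega
      have habs2 : (((n:Int)) * sx).natAbs = n := by
        rcases hsx with h | h <;> subst h <;> simp
      have hnA : ((x + (n:Int) * sx - x).natAbs : Int) = (n : Int) := by
        rw [show x + (n:Int) * sx - x = (n:Int) * sx from by ring, habs2]
      have hnpos : (0:Int) < ((x + (n:Int) * sx - x).natAbs : Int) := by omega
      have hsx' : PySem.Int.floordiv (x + (n:Int) * sx - x) ((x + (n:Int) * sx - x).natAbs : Int) = sx := by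
        rw [PySem.Int.floordiv_eq_ediv_of_pos hnpos,
            show x + (n:Int) * sx - x = (n:Int) * sx from by ring, habs2]
        exact Int.mul_ediv_cancel_left sx hn0
      have hsy' : PySem.Int.floordiv (y + (n:Int) * sy - y) ((x + (n:Int) * sx - x).natAbs : Int) = sy := by
        rw [PySem.Int.floordiv_eq_ediv_of_pos hnpos,
            show y + (n:Int) * sy - y = (n:Int) * sy from by ring,
            show x + (n:Int) * sx - x = (n:Int) * sx from by ring, habs2]
        exact Int.mul_ediv_cancel_left sy hn0
      have hk : PySem.Int.floordiv (((x + (n:Int) * sx - x).natAbs : Int)) 2 = ((n / 2 : ℕ) : Int) := by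
        rw [hnA]; exact_mod_cast PySem.Int.floordiv_natCast n 2
      set m : ℕ := n / 2 with hm
      have hm1 : m + 1 ≤ n := by omega
      have hcast : ((n - m - 1 : ℕ) : Int) = (n : Int) - (m : Int) - 1 := by omega
      have hrec : pvSeg (fuel+1) x y (x + (n:Int) * sx) (y + (n:Int) * sy)
          = pvSeg fuel x y (x + sx * ((m:Int))) (y + sy * ((m:Int))) ++
            pvSeg fuel (x + sx * ((m:Int) + 1)) (y + sy * ((m:Int) + 1)) (x + (n:Int) * sx) (y + (n:Int) * sy) := by
        rw [pvSeg]
        rw [if_neg hxne]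
        simp only [hsx', hsy', hk]
      rw [hrec]
      have hleft : pvSeg fuel x y (x + sx * (m:Int)) (y + sy * (m:Int))
          = (List.range (m + 1)).map (fun k : ℕ => [x + (k:Int) * sx, y + (k:Int) * sy]) := by
        have := ih m x y sx sy (by omega) hsx hsy
        rw [show x + (m:Int) * sx = x + sx * (m:Int) from by ring,
            show y + (m:Int) * sy = y + sy * (m:Int) from by ring] at this
        exact this
      have hright : pvSeg fuel (x + sx * ((m:Int) + 1)) (y + sy * ((m:Int) + 1)) (x + (n:Int) * sx) (y + (n:Int) * sy)
          = (List.range ((n - m - 1) + 1)).map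
              (fun k : ℕ => [x + sx * ((m:Int) + 1) + (k:Int) * sx, y + sy * ((m:Int) + 1) + (k:Int) * sy]) := by
        have := ih (n - m - 1) (x + sx * ((m:Int) + 1)) (y + sy * ((m:Int) + 1)) sx sy (by omega) hsx hsy
        rw [show x + sx * ((m:Int) + 1) + ((n - m - 1 : ℕ):Int) * sx = x + (n:Int) * sx from by
              rw [hcast]; ring,
            show y + sy * ((m:Int) + 1) + ((n - m - 1 : ℕ):Int) * sy = y + (n:Int) * sy from by
              rw [hcast]; ring] at this
        exact this
      rw [hleft, hright]
      have hsplit : n + 1 = (m + 1) + ((n - m - 1) + 1) := by omega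
      rw [hsplit,
          show List.range ((m + 1) + ((n - m - 1) + 1))
              = List.range (m + 1) ++ (List.range ((n - m - 1) + 1)).map (fun j => (m + 1) + j)
            from List.range_add,
          List.map_append, List.map_map]
      congr 1
      apply List.map_congr_left
      intro j _
      simp only [Function.comp_apply]
      have : (((m + 1) + j : ℕ) : Int) = (m : Int) + 1 + (j : Int) := by omega
      rw [this]
      simp only [List.cons.injEq, and_true]
      constructor <;> ring

lemma calc_diag_core (a b c d : Int) (t1 t2 : List Int) :
    CalcDiagonalPoint (a::b::t1) (c::d::t2) = CalcDiagonalPoint_alt (a::b::t1) (c::d::t2) := by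
  have n1 : (0:Int) ≤ (t1.length:Int) + 1 := by positivity
  have n2 : (0:Int) ≤ (t2.length:Int) + 1 := by positivity
  have e1 : PySem.List.pyGet? (a::b::t1) 0 = some a := by simp [PySem.List.pyGet?, PySem.List.pyIdx?, n1]
  have e2 : PySem.List.pyGet? (a::b::t1) 1 = some b := by simp [PySem.List.pyGet?, PySem.List.pyIdx?]
  have e3 : PySem.List.pyGet? (c::d::t2) 0 = some c := by simp [PySem.List.pyGet?, PySem.List.pyIdx?, n2]
  have e4 : PySem.List.pyGet? (c::d::t2) 1 = some d := by simp [PySem.List.pyGet?, PySem.List.pyIdx?]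
  simp only [CalcDiagonalPoint, CalcDiagonalPoint_alt, e1, e2, e3, e4]
  by_cases h1 : c - a = d - b
  · rw [if_pos h1]
    by_cases hneg : d - b < 0
    · rw [if_pos hneg]
      set n : ℕ := (b - d).toNat with hn
      have habs : ¬ (c - a).natAbs ≠ (d - b).natAbs := by omega
      rw [if_neg habs]
      have hc : c = a + (n:Int) * (-1) := by omega
      have hd : d = b + (n:Int) * (-1) := by omega
      have hfuel : (c - a).natAbs + 1 = n + 1 := by omega
      rw [hfuel, hc, hd, pvSeg_eq (n+1) n a b (-1) (-1) (by omega) (Or.inr rfl) (Or.inr rfl)]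
      rw [PySem.List.pyRange_neg_one, List.map_map]
      rw [show (0 - (b + (n:Int) * -1 - b - 1)).toNat = n + 1 from by omega]
      refine congrArg some (List.map_congr_left ?_)
      intro k _
      simp only [Function.comp_apply, List.cons.injEq, and_true]
      constructor <;> ring
    · rw [if_neg hneg]
      set n : ℕ := (d - b).toNat with hn
      have habs : ¬ (c - a).natAbs ≠ (d - b).natAbs := by omega
      rw [if_neg habs]
      have hc : c = a + (n:Int) * 1 := by omega
      have hd : d = b + (n:Int) * 1 := by omega
      have hfuel : (c - a).natAbs + 1 = n + 1 := by omega
      rw [hfuel, hc, hd, pvSeg_eq (n+1) n a b 1 1 (by omega) (Or.inl rfl) (Or.inl rfl)]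
      rw [PySem.List.pyRange_one, List.map_map]
      rw [show (b + (n:Int) * 1 - b + 1 - 0).toNat = n + 1 from by omega]
      refine congrArg some (List.map_congr_left ?_)
      intro k _
      simp only [Function.comp_apply, List.cons.injEq, and_true]
      constructor <;> ring
  · rw [if_neg h1]
    by_cases h2 : c - a = -(d - b)
    · rw [if_pos h2]
      by_cases hneg : d - b < 0
      · rw [if_pos hneg]
        set n : ℕ := (b - d).toNat with hn
        have habs : ¬ (c - a).natAbs ≠ (d - b).natAbs := by omega
        rw [if_neg habs]
        have hc : c = a + (n:Int) * 1 := by omega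
        have hd : d = b + (n:Int) * (-1) := by omega
        have hfuel : (c - a).natAbs + 1 = n + 1 := by omega
        rw [hfuel, hc, hd, pvSeg_eq (n+1) n a b 1 (-1) (by omega) (Or.inl rfl) (Or.inr rfl)]
        rw [PySem.List.pyRange_neg_one, List.map_map]
        rw [show (0 - (b + (n:Int) * -1 - b - 1)).toNat = n + 1 from by omega]
        refine congrArg some (List.map_congr_left ?_)
        intro k _
        simp only [Function.comp_apply, List.cons.injEq, and_true]
        constructor <;> ring
      · rw [if_neg hneg]
        set n : ℕ := (d - b).toNat with hn
        have habs : ¬ (c - a).natAbs ≠ (d - b).natAbs := by omega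
        rw [if_neg habs]
        have hc : c = a + (n:Int) * (-1) := by omega
        have hd : d = b + (n:Int) * 1 := by omega
        have hfuel : (c - a).natAbs + 1 = n + 1 := by omega
        rw [hfuel, hc, hd, pvSeg_eq (n+1) n a b (-1) 1 (by omega) (Or.inr rfl) (Or.inl rfl)]
        rw [PySem.List.pyRange_one, List.map_map]
        rw [show (b + (n:Int) * 1 - b + 1 - 0).toNat = n + 1 from by omega]
        refine congrArg some (List.map_congr_left ?_)
        intro k _
        simp only [Function.comp_apply, List.cons.injEq, and_true]
        constructor <;> ring
    · rw [if_neg h2]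
      have habs : (c - a).natAbs ≠ (d - b).natAbs := by omega
      rw [if_pos habs]

-- ===== VERDICT (by name: the statement is the Claim_ definition above) =====
theorem CalcDiagonalPoint_spec : Claim_equal_CalcDiagonalPoint := by
  intro p1 p2 _ hpre
  unfold Spec_CalcDiagonalPoint
  obtain ⟨h1, h2⟩ := hpre
  rcases p1 with _ | ⟨a, _ | ⟨b, t1⟩⟩
  · simp at h1
  · simp at h1
  · rcases p2 with _ | ⟨c, _ | ⟨d, t2⟩⟩
    · simp at h2
    · simp at h2
    · exact calc_diag_core a b c d t1 t2
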